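-- pv_equiv track=rewrite | github.com/Newsdee/pce-tracker-converter | lib/mod_parser.py | period_to_note_and_octave
-- ===== SOURCE A (Python) =====
-- PERIOD_TABLE = [
--     856, 808, 762, 720, 678, 640, 604, 570, 538, 508, 480, 453,   # Octave 1
--     428, 404, 381, 360, 339, 320, 302, 285, 269, 254, 240, 226,   # Octave 2
--     214, 202, 190, 180, 170, 160, 151, 143, 135, 127, 120, 113,   # Octave 3
--     107, 101,  95,  90,  85,  80,  75,  71,  67,  63,  60,  56    # Octave 4+
-- ]
--
-- def period_to_note_and_octave(period: int) -> tuple[int, int]: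
--     """Convert MOD period to (Furnace note, octave)"""
--     if period == 0:
--         return 0, 3
--
--     # Find closest period
--     best_idx = 0
--     best_diff = abs(PERIOD_TABLE[0] - period)
--     for i, p in enumerate(PERIOD_TABLE):
--         diff = abs(p - period)
--         if diff < best_diff:
--             best_diff = diff
--             best_idx = i
--
--     note = (best_idx % 12) + 1
--     octave = (best_idx // 12) + 3   # ProTracker oct 1 = Furnace oct 3
--     return note, octave
-- ===== SOURCE B (Python) =====
-- PERIOD_TABLE = [
--     856, 808, 762, 720, 678, 640, 604, 570, 538, 508, 480, 453,
--     428, 404, 381, 360, 339, 320, 302, 285, 269, 254, 240, 226,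
--     214, 202, 190, 180, 170, 160, 151, 143, 135, 127, 120, 113,
--     107, 101,  95,  90,  85,  80,  75,  71,  67,  63,  60,  56
-- ]
--
-- # Sums of adjacent table entries: 2*period compared with these decides between
-- # neighbouring indices (ties go to the smaller index / larger period).
-- _MIDSUMS = [PERIOD_TABLE[i] + PERIOD_TABLE[i + 1] for i in range(len(PERIOD_TABLE) - 1)]
--
-- def period_to_note_and_octave(period: int) -> tuple[int, int]:
--     """Convert MOD period to (Furnace note, octave)"""
--     if period == 0:
--         return 0, 3
--     x = 2 * period
--     # binary search: first index whose midsum is <= x (midsums are strictly descending)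
--     lo, hi = 0, len(_MIDSUMS)
--     while lo < hi:
--         mid = (lo + hi) // 2
--         if _MIDSUMS[mid] > x:
--             lo = mid + 1
--         else:
--             hi = mid
--     return lo % 12 + 1, lo // 12 + 3
-- ===== Notes on version B (the rewrite author's own statement) =====
-- stated objective: alternative
-- what changed: Replaces the linear scan over every table entry tracking the best absolute difference by a binary search over the precomputed adjacent-pair sums of the table: comparing twice the period with a pair sum decides between neighbouring indices, with ties resolved to the smaller index exactly as A's first-wins scan does.
import Mathlib
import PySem

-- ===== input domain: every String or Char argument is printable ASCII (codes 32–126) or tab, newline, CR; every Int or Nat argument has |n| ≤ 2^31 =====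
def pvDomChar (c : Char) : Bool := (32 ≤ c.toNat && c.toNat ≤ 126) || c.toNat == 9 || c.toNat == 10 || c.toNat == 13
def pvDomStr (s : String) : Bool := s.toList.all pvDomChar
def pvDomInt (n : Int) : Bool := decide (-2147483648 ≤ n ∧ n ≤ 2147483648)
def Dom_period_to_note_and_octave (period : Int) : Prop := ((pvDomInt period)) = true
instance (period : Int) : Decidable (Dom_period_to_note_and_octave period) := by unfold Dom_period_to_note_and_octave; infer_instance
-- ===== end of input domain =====

-- B replaces A's linear closest-difference scan by a binary search over the
-- adjacent-pair sums of the table (comparing twice the period with a pair sum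
-- decides between the two neighbouring indices, ties going to the smaller index,
-- which matches A's first-wins scan); same return value everywhere.

-- ===== PORT A =====
def periodTable : List Int :=
  [856, 808, 762, 720, 678, 640, 604, 570, 538, 508, 480, 453,
   428, 404, 381, 360, 339, 320, 302, 285, 269, 254, 240, 226,
   214, 202, 190, 180, 170, 160, 151, 143, 135, 127, 120, 113,
   107, 101,  95,  90,  85,  80,  75,  71,  67,  63,  60,  56]

def period_to_note_and_octave (period : Int) : Int × Int :=
  if period = 0 then (0, 3)
  else
    let st := (PySem.List.enumerate periodTable).foldl
      (fun (st : Int × Int) (ip : Int × Int) =>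
        let diff := |ip.2 - period|
        if diff < st.2 then (ip.1, diff) else st)
      (0, |periodTable.getD 0 0 - period|)
    (PySem.Int.mod st.1 12 + 1, PySem.Int.floordiv st.1 12 + 3)

-- ===== PORT B =====
def periodTableB : List Int :=
  [856, 808, 762, 720, 678, 640, 604, 570, 538, 508, 480, 453,
   428, 404, 381, 360, 339, 320, 302, 285, 269, 254, 240, 226,
   214, 202, 190, 180, 170, 160, 151, 143, 135, 127, 120, 113,
   107, 101,  95,  90,  85,  80,  75,  71,  67,  63,  60,  56]

-- _MIDSUMS: sums of adjacent table entries
def midsums : List Int :=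
  (List.range (periodTableB.length - 1)).map
    (fun i => periodTableB.getD i 0 + periodTableB.getD (i + 1) 0)

-- the while-loop of Source B: first index in [lo, hi) whose midsum is ≤ x
-- (fuel makes the loop structurally recursive; hi - lo shrinks every pass, so
-- fuel = hi - lo at the call site is always enough)
def bsearchIdx (x : Int) : Nat → Nat → Nat → Nat
  | 0, lo, _ => lo
  | fuel + 1, lo, hi =>
    if lo < hi then
      let mid := (lo + hi) / 2
      if midsums.getD mid 0 > x then bsearchIdx x fuel (mid + 1) hi
      else bsearchIdx x fuel lo mid
    else lo

def period_to_note_and_octave_alt (period : Int) : Int × Int :=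
  if period = 0 then (0, 3)
  else
    let x := 2 * period
    let lo := bsearchIdx x midsums.length 0 midsums.length
    (((lo % 12 : Nat) : Int) + 1, ((lo / 12 : Nat) : Int) + 3)

-- ===== PRECONDITION & SPEC =====
def Spec_period_to_note_and_octave (period : Int) (out : Int × Int) : Prop := out = period_to_note_and_octave_alt period
instance (period : Int) (out : Int × Int) : Decidable (Spec_period_to_note_and_octave period out) := by unfold Spec_period_to_note_and_octave; infer_instance

-- ===== CLAIM (what is proved, stated in full; the proofs are below) =====
def Claim_equal_period_to_note_and_octave : Prop := ∀ (period : Int), Dom_period_to_note_and_octave period → Spec_period_to_note_and_octave period (period_to_note_and_octave period)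

-- ===== LEMMAS AND PROOFS =====

-- sums of adjacent elements of a list (the mathematical form of _MIDSUMS)
def adjSums : List Int → List Int
  | a :: b :: t => (a + b) :: adjSums (b :: t)
  | _ => []

-- |b - p| < |a - p| for b < a is exactly "p is above the midpoint of a and b"
lemma abs_lt_abs_iff (p a b : Int) (h : b < a) : |b - p| < |a - p| ↔ 2 * p < a + b := by
  rcases abs_cases (b - p) with ⟨h1, _⟩ | ⟨h1, _⟩ <;>
    rcases abs_cases (a - p) with ⟨h2, _⟩ | ⟨h2, _⟩ <;> rw [h1, h2] <;> omega

lemma adjSums_lt_head : ∀ (l : List Int) (a : Int),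
    List.Pairwise (fun x y => y < x) (a :: l) → ∀ s ∈ adjSums (a :: l), s < 2 * a := by
  intro l
  induction l with
  | nil => intro a _ s hs; simp [adjSums] at hs
  | cons b t ih =>
    intro a hp s hs
    rw [adjSums] at hs
    rcases List.mem_cons.mp hs with rfl | hs'
    · have := (List.pairwise_cons.mp hp).1 b (by simp); omega
    · have hb : b < a := (List.pairwise_cons.mp hp).1 b (by simp)
      have := ih b (List.pairwise_cons.mp hp).2 s hs'; omega

-- A's scan does not move once every remaining diff fails to beat the current best
lemma scan_noimp (p : Int) (l : List (Int × Int)) (st : Int × Int)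
    (h : ∀ e ∈ l, ¬ |e.2 - p| < st.2) :
    l.foldl (fun (st : Int × Int) (ip : Int × Int) =>
      let diff := |ip.2 - p|
      if diff < st.2 then (ip.1, diff) else st) st = st := by
  induction l with
  | nil => rfl
  | cons e t ih =>
    simp only [List.foldl_cons]
    rw [if_neg (h e (List.mem_cons_self))]
    exact ih (fun e' he' => h e' (List.mem_cons_of_mem _ he'))

-- characterisation of A's scan on a strictly descending tail: the best index
-- advances exactly as long as 2*p is above the adjacent-pair sums
lemma scan_desc (p : Int) : ∀ (l : List Int) (v : Int) (i : Int),
    List.Pairwise (fun x y => y < x) (v :: l) →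
    (PySem.List.enumerate l (i + 1)).foldl
      (fun (st : Int × Int) (ip : Int × Int) =>
        let diff := |ip.2 - p|
        if diff < st.2 then (ip.1, diff) else st) (i, |v - p|) =
      (i + ((adjSums (v :: l)).countP (fun s => decide (2 * p < s)) : Int),
       |(v :: l).getD ((adjSums (v :: l)).countP (fun s => decide (2 * p < s))) 0 - p|) := by
  intro l
  induction l with
  | nil => intro v i _; simp [adjSums, PySem.List.enumerate_nil]
  | cons w t ih =>
    intro v i hp
    have hwv : w < v := (List.pairwise_cons.mp hp).1 w (by simp)
    rw [PySem.List.enumerate_cons, List.foldl_cons]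
    by_cases hc : 2 * p < v + w
    · rw [if_pos ((abs_lt_abs_iff p v w hwv).mpr hc)]
      rw [ih w (i + 1) (List.pairwise_cons.mp hp).2]
      have hcount : (adjSums (v :: w :: t)).countP (fun s => decide (2 * p < s)) =
          (adjSums (w :: t)).countP (fun s => decide (2 * p < s)) + 1 := by
        rw [adjSums, List.countP_cons]; simp [hc]
      rw [hcount]
      simp only [Prod.mk.injEq]
      refine ⟨by push_cast; ring, by rw [List.getD_cons_succ]⟩
    · rw [if_neg (fun hlt => hc ((abs_lt_abs_iff p v w hwv).mp hlt))]
      have hcount : (adjSums (v :: w :: t)).countP (fun s => decide (2 * p < s)) = 0 := by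
        rw [adjSums, List.countP_cons]
        simp only [decide_eq_true_eq]
        rw [List.countP_eq_zero.mpr, if_neg hc]
        intro s hs
        have := adjSums_lt_head t w (List.pairwise_cons.mp hp).2 s hs
        have hw2 : 2 * w ≤ v + w := by omega
        simp only [decide_eq_true_eq]; omega
      rw [hcount]
      rw [scan_noimp]
      · simp
      · intro e he
        rcases (PySem.List.mem_enumerate_iff t (i + 1 + 1) e).mp he with ⟨k, hk, rfl⟩
        have hmem : t[k] ∈ t := List.getElem_mem hk
        have hlt : t[k] < w := (List.pairwise_cons.mp (List.pairwise_cons.mp hp).2).1 _ hmem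
        intro habs
        have := (abs_lt_abs_iff p v (t[k]) (by omega)).mp habs
        omega

-- how many leading elements of a strictly descending list exceed x
lemma countP_desc_iff (x : Int) : ∀ (m : List Int),
    List.Pairwise (fun a b => b < a) m → ∀ i, i < m.length →
    (x < m.getD i 0 ↔ i < m.countP (fun s => decide (x < s))) := by
  intro m
  induction m with
  | nil => intro _ i hi; simp at hi
  | cons a t ih =>
    intro hp i hi
    rw [List.countP_cons]
    by_cases hxa : x < a
    · simp only [decide_eq_true_eq, if_pos hxa]
      cases i with
      | zero => simpa using hxa
      | succ j =>
        have hj : j < t.length := by simpa using hi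
        have := ih (List.pairwise_cons.mp hp).2 j hj
        rw [List.getD_cons_succ, this]
        omega
    · have ht0 : t.countP (fun s => decide (x < s)) = 0 := by
        rw [List.countP_eq_zero]
        intro s hs
        have := (List.pairwise_cons.mp hp).1 s hs
        simp only [decide_eq_true_eq]; omega
      simp only [decide_eq_true_eq, if_neg hxa, ht0]
      cases i with
      | zero => simpa using hxa
      | succ j =>
        have hj : j < t.length := by simpa using hi
        have hmem : (a :: t).getD (j + 1) 0 = t[j] := by
          rw [List.getD_cons_succ, List.getD_eq_getElem _ _ hj]
        rw [hmem]
        have := (List.pairwise_cons.mp hp).1 t[j] (List.getElem_mem hj)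
        constructor
        · intro h'; omega
        · intro h'; omega

lemma midsums_pairwise : List.Pairwise (fun a b => b < a) midsums := by decide

lemma midsums_len : midsums.length = 47 := by decide

-- binary-search correctness: with the count c of elements > x bracketed in [lo, hi],
-- the loop converges to c
lemma bs_correct (x : Int) : ∀ (fuel lo hi : Nat), hi - lo ≤ fuel → lo ≤ hi →
    hi ≤ midsums.length →
    lo ≤ midsums.countP (fun s => decide (x < s)) →
    midsums.countP (fun s => decide (x < s)) ≤ hi →
    bsearchIdx x fuel lo hi = midsums.countP (fun s => decide (x < s)) := by
  intro fuel
  induction fuel with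
  | zero => intro lo hi h1 h2 _ h4 h5; rw [bsearchIdx]; omega
  | succ f ih =>
    intro lo hi h1 h2 h3 h4 h5
    rw [bsearchIdx]
    by_cases hlh : lo < hi
    · rw [if_pos hlh]
      by_cases hx : midsums.getD ((lo + hi) / 2) 0 > x
      · rw [if_pos hx]
        have hmidlt : (lo + hi) / 2 < midsums.countP (fun s => decide (x < s)) :=
          (countP_desc_iff x midsums midsums_pairwise _ (by omega)).mp hx
        exact ih _ _ (by omega) (by omega) h3 (by omega) h5
      · rw [if_neg hx]
        have hmidge : ¬ (lo + hi) / 2 < midsums.countP (fun s => decide (x < s)) :=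
          fun h' => hx ((countP_desc_iff x midsums midsums_pairwise _ (by omega)).mpr h')
        exact ih _ _ (by omega) (by omega) (by omega) h4 (by omega)
    · rw [if_neg hlh]; omega

lemma adjSums_eq_midsums : adjSums periodTable = midsums := by decide

lemma periodTable_pairwise : List.Pairwise (fun x y => y < x) periodTable := by decide

theorem period_to_note_and_octave_spec : Claim_equal_period_to_note_and_octave := by
  unfold Claim_equal_period_to_note_and_octave
  intro period _
  unfold Spec_period_to_note_and_octave
  by_cases h0 : period = 0
  · simp [period_to_note_and_octave, period_to_note_and_octave_alt, h0]
  · have hA : period_to_note_and_octave period =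
        (PySem.Int.mod ((midsums.countP (fun s => decide (2 * period < s)) : Int)) 12 + 1,
         PySem.Int.floordiv ((midsums.countP (fun s => decide (2 * period < s)) : Int)) 12 + 3) := by
      rw [period_to_note_and_octave, if_neg h0]
      have htab : periodTable = 856 :: periodTable.tail := by decide
      rw [htab]
      rw [PySem.List.enumerate_cons, List.foldl_cons]
      have hd0 : ((856 : Int) :: periodTable.tail).getD 0 0 = 856 := by rfl
      rw [hd0]
      rw [if_neg (by simp)]
      have := scan_desc period periodTable.tail 856 0 (by rw [← htab]; exact periodTable_pairwise)
      simp only [zero_add] at this ⊢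
      rw [this]
      rw [show (856 : Int) :: periodTable.tail = periodTable from htab.symm, adjSums_eq_midsums]
    have hB : bsearchIdx (2 * period) midsums.length 0 midsums.length =
        midsums.countP (fun s => decide (2 * period < s)) := by
      apply bs_correct <;> first | omega | exact List.countP_le_length
    rw [hA, period_to_note_and_octave_alt, if_neg h0]
    simp only [hB]
    have hc := List.countP_le_length (l := midsums) (p := fun s => decide (2 * period < s))
    rw [midsums_len] at hc
    set c := midsums.countP (fun s => decide (2 * period < s)) with hcdef
    simp only [PySem.Int.mod, PySem.Int.floordiv, Prod.mk.injEq]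
    rw [Int.fmod_eq_emod, Int.fdiv_eq_ediv]
    refine ⟨by omega, by omega⟩
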